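-- pv_equiv track=rewrite | github.com/miladmasoodi/GutenReader | SiteScripts/BookParser.py | get_chapter_names
-- ===== SOURCE A (Python) =====
-- def get_chapter_names(cont_start, Book_Lines):
--     Chapter_Names = []
--     for i in range(cont_start, len(Book_Lines)):
--         cur_line = Book_Lines[i]
--         if cur_line.isspace() is False and cur_line != "":
--             # Checks if the title of the first chapter has been reached improve
--             if len(Chapter_Names) > 0 and cur_line.startswith(Chapter_Names[0][:7]):
--                 break
--             Chapter_Names.append(cur_line.lstrip())
--     return Chapter_Names
-- ===== SOURCE B (Python) =====
-- def get_chapter_names(cont_start, Book_Lines):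
--     # Pass 1: materialize the non-blank lines of the scanned region (raw).
--     content = [Book_Lines[i] for i in range(cont_start, len(Book_Lines))
--                if Book_Lines[i] != "" and not Book_Lines[i].isspace()]
--     if not content:
--         return []
--     # Pass 2: cut the raw content at the first later line repeating the prefix.
--     prefix = content[0].lstrip()[:7]
--     kept = [content[0]]
--     for ln in content[1:]:
--         if ln.startswith(prefix):
--             break
--         kept.append(ln)
--     # Pass 3: strip leading whitespace from every kept line.
--     return [ln.lstrip() for ln in kept]
-- ===== Notes on version B (the rewrite author's own statement) =====
-- stated objective: alternative
-- what changed: A interleaves blank-skipping, accumulator-guarded prefix breaking and lstrip in one indexed loop; B is a three-stage pipeline: a filter comprehension materializes the raw content lines, a takewhile-style cut truncates them at the first repeat of the 7-char prefix of the first line, and a final map applies lstrip.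
import Mathlib
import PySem

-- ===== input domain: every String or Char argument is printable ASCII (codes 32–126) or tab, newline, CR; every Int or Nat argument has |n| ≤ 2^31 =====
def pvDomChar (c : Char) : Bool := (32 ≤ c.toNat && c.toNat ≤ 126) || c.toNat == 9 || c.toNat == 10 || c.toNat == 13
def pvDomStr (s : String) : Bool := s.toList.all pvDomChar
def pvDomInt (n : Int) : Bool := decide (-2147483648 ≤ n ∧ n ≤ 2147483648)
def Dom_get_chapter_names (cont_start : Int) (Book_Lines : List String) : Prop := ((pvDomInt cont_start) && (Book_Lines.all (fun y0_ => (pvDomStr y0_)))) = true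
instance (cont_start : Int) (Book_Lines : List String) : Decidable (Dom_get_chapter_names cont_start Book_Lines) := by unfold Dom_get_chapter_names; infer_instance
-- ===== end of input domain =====

-- B replaces A's single indexed loop by a three-stage pipeline (filter the content
-- lines, cut at the prefix repeat, map lstrip); same return value (objective: alternative).

-- ===== PORT A =====
-- A's single for-loop over range(cont_start, len) with the accumulator Chapter_Names;
-- the pyGet? none branch (IndexError in Python) is unreachable under Pre_.
def pvLoopA (bl : List String) : List Int → List String → List String
  | [], acc => acc
  | i :: is, acc =>
    match PySem.List.pyGet? bl i with
    | none => acc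
    | some cur =>
      if (!PySem.Str.strIsspace cur && !(cur == "")) then
        if (acc.length > 0 && PySem.Str.startswith cur (PySem.Str.slice (PySem.List.pyGetD acc 0 "") none (some 7))) then
          acc
        else pvLoopA bl is (acc ++ [PySem.Str.lstrip cur])
      else pvLoopA bl is acc

def get_chapter_names (cont_start : Int) (Book_Lines : List String) : List String :=
  pvLoopA Book_Lines (PySem.List.pyRange cont_start (Book_Lines.length : Int) 1) []

-- ===== PORT B =====
-- Pass 1: the filter comprehension — the raw non-blank lines of the scanned region
-- (the pyGet? none branch, IndexError in Python, is unreachable under Pre_).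
def pvContent (bl : List String) : List Int → List String
  | [] => []
  | i :: is =>
    match PySem.List.pyGet? bl i with
    | none => []
    | some cur =>
      if (!(cur == "") && !PySem.Str.strIsspace cur) then cur :: pvContent bl is
      else pvContent bl is

-- Pass 2: the for-loop with break — keep raw lines until one starts with the prefix.
def pvCut (pre : String) : List String → List String
  | [] => []
  | ln :: rest => if PySem.Str.startswith ln pre then [] else ln :: pvCut pre rest

def get_chapter_names_alt (cont_start : Int) (Book_Lines : List String) : List String :=
  match pvContent Book_Lines (PySem.List.pyRange cont_start (Book_Lines.length : Int) 1) with
  | [] => []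
  | f :: rest =>
    let pre := PySem.Str.slice (PySem.Str.lstrip f) none (some 7)
    -- Pass 3: the final lstrip map over the kept raw lines.
    (f :: pvCut pre rest).map PySem.Str.lstrip

-- ===== PRECONDITION & SPEC =====
-- Python A raises IndexError on its first access when cont_start < -len(Book_Lines)
-- (negative-index wraparound out of range); B raises identically there.
def Pre_get_chapter_names (cont_start : Int) (Book_Lines : List String) : Prop :=
  -(Book_Lines.length : Int) ≤ cont_start
instance (cont_start : Int) (Book_Lines : List String) : Decidable (Pre_get_chapter_names cont_start Book_Lines) := by unfold Pre_get_chapter_names; infer_instance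

def pvWitness_get_chapter_names : Int × List String := (0, ["CONTENTS", "", "  Chapter 1", "Chapter 2", "Chapter 1. The Start"])

def Spec_get_chapter_names (cont_start : Int) (Book_Lines : List String) (out : List String) : Prop := out = get_chapter_names_alt cont_start Book_Lines
instance (cont_start : Int) (Book_Lines : List String) (out : List String) : Decidable (Spec_get_chapter_names cont_start Book_Lines out) := by unfold Spec_get_chapter_names; infer_instance

-- ===== CLAIM (what is proved, stated in full; the proofs are below) =====
def Claim_equal_get_chapter_names : Prop := ∀ (cont_start : Int) (Book_Lines : List String), Dom_get_chapter_names cont_start Book_Lines → Pre_get_chapter_names cont_start Book_Lines → Spec_get_chapter_names cont_start Book_Lines (get_chapter_names cont_start Book_Lines)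

-- ===== LEMMAS AND PROOFS =====

-- Proof-only helper: A's loop body replayed over the already-filtered content lines.
def pvLoopC : List String → List String → List String
  | [], acc => acc
  | cur :: rest, acc =>
    if (acc.length > 0 && PySem.Str.startswith cur (PySem.Str.slice (PySem.List.pyGetD acc 0 "") none (some 7))) then
      acc
    else pvLoopC rest (acc ++ [PySem.Str.lstrip cur])

-- A's indexed loop equals the replay over the filtered content.
theorem pvLoopA_eq_loopC (bl : List String) (is : List Int) (acc : List String) :
    pvLoopA bl is acc = pvLoopC (pvContent bl is) acc := by
  induction is generalizing acc with
  | nil => simp [pvLoopA, pvContent, pvLoopC]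
  | cons i is ih =>
    simp only [pvLoopA, pvContent]
    cases h : PySem.List.pyGet? bl i with
    | none => simp [pvLoopC]
    | some cur =>
      dsimp only
      rw [show (!(cur == "") && !PySem.Str.strIsspace cur)
            = (!PySem.Str.strIsspace cur && !(cur == "")) from Bool.and_comm ..]
      cases hc : (!PySem.Str.strIsspace cur && !(cur == "")) with
      | false => simpa using ih acc
      | true =>
        simp only [if_true, pvLoopC]
        split
        · rfl
        · exact ih _

-- With a nonempty accumulator the replay is accumulator ++ lstrip-mapped cut.
theorem pvLoopC_cons (rest acc : List String) (f : String) :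
    pvLoopC rest (f :: acc)
      = (f :: acc) ++ (pvCut (PySem.Str.slice f none (some 7)) rest).map PySem.Str.lstrip := by
  induction rest generalizing acc with
  | nil => simp [pvLoopC, pvCut]
  | cons cur rest ih =>
    simp only [pvLoopC, pvCut, List.length_cons, gt_iff_lt, Nat.succ_pos, decide_true,
      Bool.true_and, PySem.List.pyGetD_zero_cons]
    cases hp : PySem.Str.startswith cur (PySem.Str.slice f none (some 7)) with
    | true => simp
    | false =>
      simp only [Bool.false_eq_true, if_false, List.map_cons]
      rw [show (f :: acc) ++ [PySem.Str.lstrip cur] = f :: (acc ++ [PySem.Str.lstrip cur]) from rfl,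
        ih]
      simp

-- ===== VERDICT (by name: the statement is the Claim_ definition above) =====
theorem get_chapter_names_spec : Claim_equal_get_chapter_names := by
  intro cont_start Book_Lines _ _
  unfold Spec_get_chapter_names get_chapter_names get_chapter_names_alt
  rw [pvLoopA_eq_loopC]
  cases h : pvContent Book_Lines (PySem.List.pyRange cont_start (Book_Lines.length : Int) 1) with
  | nil => simp [pvLoopC]
  | cons f rest =>
    simp only [pvLoopC, List.length_nil, gt_iff_lt, lt_self_iff_false, decide_false,
      Bool.false_and, Bool.false_eq_true, if_false, List.nil_append, List.map_cons]
    exact pvLoopC_cons rest [] (PySem.Str.lstrip f)
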